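-- pv_equiv track=rewrite | github.com/evyoung1/cryptography | crypto.py | vigenere_key
-- ===== SOURCE A (Python) =====
-- def vigenere_key(plaintext, keyword):
--     keylist = list(keyword)
--     if len(plaintext) == len(keylist):
--         return keyword
--     if len(plaintext) < len(keyword):
--         keylist = keyword[0:len(keyword)-(len(keyword)-len(plaintext))]
--         return ("".join(keylist))
--     else:
--         for character in range(len(plaintext)-len(keylist)):
--             keylist.append(keylist[character%len(keylist)])
--     newKeyWord = "".join(keylist)
--     return newKeyWord
-- ===== SOURCE B (Python) =====
-- def vigenere_key(plaintext, keyword):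
--     n, k = len(plaintext), len(keyword)
--     if n <= k:
--         return keyword[:n]
--     return (keyword * (n // k + 1))[:n]
-- ===== Notes on version B (the rewrite author's own statement) =====
-- stated objective: simpler
-- what changed: Replaces A's element-by-element cyclic append loop (with per-step modular indexing into a growing list) by a closed-form construction: repeat the keyword n//k+1 times and slice to length n.
import Mathlib
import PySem

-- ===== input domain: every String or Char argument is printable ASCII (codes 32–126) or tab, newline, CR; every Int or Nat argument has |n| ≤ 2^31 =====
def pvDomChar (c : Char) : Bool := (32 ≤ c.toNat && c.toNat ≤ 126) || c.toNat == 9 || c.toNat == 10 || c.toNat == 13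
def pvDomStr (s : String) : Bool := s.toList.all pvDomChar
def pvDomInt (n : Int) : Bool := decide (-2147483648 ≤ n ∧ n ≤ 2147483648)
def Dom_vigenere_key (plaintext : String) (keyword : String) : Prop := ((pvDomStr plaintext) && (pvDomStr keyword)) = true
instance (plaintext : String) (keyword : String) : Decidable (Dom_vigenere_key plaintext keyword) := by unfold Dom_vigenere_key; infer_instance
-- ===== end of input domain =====

-- B replaces A's element-by-element cyclic append loop with a closed-form repeat-and-slice construction (objective: simpler).


-- ===== PORT A =====
-- Literal port of A. The loop indexes keylist[character % len(keylist)] into the GROWING list;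
-- inside Pre_ (keyword nonempty there) the index is in range and the Nat % matches Python's %
-- on these nonnegative values, so List.getD with a dummy default is exact there.
def vigenere_key (plaintext : String) (keyword : String) : String :=
  let keylist := keyword.toList
  if plaintext.toList.length = keylist.length then keyword
  else if plaintext.toList.length < keyword.toList.length then
    String.ofList (PySem.List.slice keyword.toList (some 0)
      (some ((keyword.toList.length : Int) - ((keyword.toList.length : Int) - (plaintext.toList.length : Int)))))
  else
    let keylist := (List.range (plaintext.toList.length - keylist.length)).foldl
      (fun acc character => acc ++ [acc.getD (character % acc.length) ' ']) keylist
    String.ofList keylist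

-- ===== PORT B =====
-- Port of Source B. keyword[:n] with n = len(plaintext) ≥ 0 is List.take n (exact for a
-- nonnegative bound); keyword * (n//k+1) is flatten of replicate; n//k on nonneg ints is
-- Nat division (exact for k > 0; k = 0 with n > 0 is excluded by Pre_, Python raises there).
def vigenere_key_alt (plaintext : String) (keyword : String) : String :=
  let n := plaintext.toList.length
  let k := keyword.toList.length
  if n ≤ k then String.ofList (keyword.toList.take n)
  else String.ofList ((List.replicate (n / k + 1) keyword.toList).flatten.take n)

-- ===== PRECONDITION & SPEC =====
-- Pre_ excludes exactly the inputs with empty keyword and nonempty plaintext, on which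
-- BOTH A and B raise ZeroDivisionError in Python (A: modulo by zero; B: n // 0).
def Pre_vigenere_key (plaintext : String) (keyword : String) : Prop :=
  keyword ≠ "" ∨ plaintext = ""
instance (plaintext : String) (keyword : String) : Decidable (Pre_vigenere_key plaintext keyword) := by
  unfold Pre_vigenere_key; infer_instance
def pvWitness_vigenere_key : String × String := ("hello world", "key")

def Spec_vigenere_key (plaintext : String) (keyword : String) (out : String) : Prop := out = vigenere_key_alt plaintext keyword
instance (plaintext : String) (keyword : String) (out : String) : Decidable (Spec_vigenere_key plaintext keyword out) := by unfold Spec_vigenere_key; infer_instance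

-- ===== CLAIM (what is proved, stated in full; the proofs are below) =====
def Claim_equal_vigenere_key : Prop := ∀ (plaintext : String) (keyword : String), Dom_vigenere_key plaintext keyword → Pre_vigenere_key plaintext keyword → Spec_vigenere_key plaintext keyword (vigenere_key plaintext keyword)

-- ===== LEMMAS AND PROOFS =====

-- the cyclic extension of l to length t
def pvCyc (l : List Char) (t : Nat) : List Char :=
  (List.range t).map (fun i => l.getD (i % l.length) ' ')

theorem pvCyc_len (l : List Char) : pvCyc l l.length = l := by
  apply List.ext_getElem
  · simp [pvCyc]
  · intro i h1 h2
    simp only [pvCyc, List.getElem_map, List.getElem_range]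
    rw [Nat.mod_eq_of_lt h2]
    exact List.getD_eq_getElem l ' ' h2

theorem pvCyc_succ (l : List Char) (t : Nat) :
    pvCyc l (t + 1) = pvCyc l t ++ [l.getD (t % l.length) ' '] := by
  simp [pvCyc, List.range_succ]

theorem pvCyc_take (l : List Char) {t u : Nat} (h : t ≤ u) :
    (pvCyc l u).take t = pvCyc l t := by
  simp [pvCyc, ← List.map_take, List.take_range, Nat.min_eq_left h]

theorem pvCyc_add (l : List Char) (t : Nat) :
    pvCyc l (l.length + t) = l ++ pvCyc l t := by
  unfold pvCyc
  rw [List.range_add, List.map_append]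
  congr 1
  · have := pvCyc_len l; simpa [pvCyc] using this
  · simp [List.map_map, Function.comp, Nat.add_mod_left]

theorem pvFlatten_replicate (l : List Char) (r : Nat) :
    (List.replicate r l).flatten = pvCyc l (r * l.length) := by
  induction r with
  | zero => simp [pvCyc]
  | succ r ih =>
    rw [List.replicate_succ, List.flatten_cons, ih,
      show (r + 1) * l.length = l.length + r * l.length by ring, pvCyc_add]

theorem pvLoop (l : List Char) (hl : l ≠ []) (m : Nat) :
    (List.range m).foldl (fun acc character => acc ++ [acc.getD (character % acc.length) ' ']) l
      = pvCyc l (l.length + m) := by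
  have hk : 0 < l.length := List.length_pos_iff.mpr hl
  induction m with
  | zero => simp [pvCyc_len]
  | succ m ih =>
    rw [List.range_succ, List.foldl_append, ih]
    simp only [List.foldl_cons, List.foldl_nil]
    have hlen : (pvCyc l (l.length + m)).length = l.length + m := by simp [pvCyc]
    have hget : (pvCyc l (l.length + m)).getD (m % (pvCyc l (l.length + m)).length) ' '
        = l.getD (m % l.length) ' ' := by
      rw [hlen, Nat.mod_eq_of_lt (by omega)]
      rw [List.getD_eq_getElem _ _ (by rw [hlen]; omega)]
      simp [pvCyc]
    rw [hget, show l.length + (m + 1) = (l.length + m) + 1 by omega, pvCyc_succ, Nat.add_mod_left]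

-- ===== VERDICT (by name: the statement is the Claim_ definition above) =====
theorem vigenere_key_spec : Claim_equal_vigenere_key := by
  intro plaintext keyword _ hpre
  unfold Spec_vigenere_key vigenere_key vigenere_key_alt
  simp only
  by_cases heq : plaintext.toList.length = keyword.toList.length
  · rw [if_pos heq, if_pos (le_of_eq heq), heq, List.take_length, String.ofList_toList]
  · rw [if_neg heq]
    by_cases hlt : plaintext.toList.length < keyword.toList.length
    · -- shorter plaintext: slice [0 : k-(k-n)] = take n
      rw [if_pos hlt, if_pos (le_of_lt hlt)]
      have hb : ((keyword.toList.length : Int) - ((keyword.toList.length : Int)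
          - (plaintext.toList.length : Int))) = ((plaintext.toList.length : Nat) : Int) := by
        ring
      rw [hb]
      congr 1
      rw [show ((0 : Int)) = ((0 : Nat) : Int) from rfl, PySem.List.slice_natCast]
      simp
    · -- longer plaintext: the loop builds pvCyc, and so does repeat-and-slice
      have hgt : keyword.toList.length < plaintext.toList.length := by omega
      rw [if_neg hlt, if_neg (by omega)]
      have hne : keyword.toList ≠ [] := by
        rcases hpre with h | h
        · exact fun hc => h (String.toList_eq_nil_iff.mp hc)
        · exfalso
          have : plaintext.toList = [] := String.toList_eq_nil_iff.mpr h
          rw [this] at hgt; simp at hgt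
      have hk : 0 < keyword.toList.length := List.length_pos_iff.mpr hne
      rw [pvLoop _ hne, pvFlatten_replicate]
      rw [show keyword.toList.length + (plaintext.toList.length - keyword.toList.length)
        = plaintext.toList.length by omega]
      have h2 : plaintext.toList.length
          ≤ (plaintext.toList.length / keyword.toList.length + 1) * keyword.toList.length := by
        have := Nat.div_add_mod plaintext.toList.length keyword.toList.length
        have := Nat.mod_lt plaintext.toList.length hk
        nlinarith
      rw [pvCyc_take _ h2]
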